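-- pv_equiv track=rewrite | github.com/pypi-data/pypi-mirror-390 | packages/plexos-to-pypsa-converter/plexos_to_pypsa_converter-0.1.0.tar.gz/plexos_to_pypsa_converter-0.1.0/src/plexos_to_pypsa_converter/db/timeslice_parser.py | _extract_statements
-- ===== SOURCE A (Python) =====
-- def _extract_statements(clause: str) -> list[str]:
--     """Extract individual statements from a clause.
--
--     Handles cases like "M4-9,H1-3,24" where "H1-3,24" is a single statement.
--
--     Parameters
--     ----------
--     clause : str
--         Clause string with comma-separated statements
--
--     Returns
--     -------
--     list[str]
--         List of statements (e.g., ["M4-9", "H1-3,24"])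
--
--     Examples
--     --------
--     >>> _extract_statements("M4-9,H1-3,24")
--     ['M4-9', 'H1-3,24']
--     >>> _extract_statements("M6-9,H16-22")
--     ['M6-9', 'H16-22']
--     >>> _extract_statements("W2-7,H7-22")
--     ['W2-7', 'H7-22']
--     """
--     statements = []
--     current_stmt = ""
--     i = 0
--
--     while i < len(clause):
--         char = clause[i]
--
--         if char == ",":
--             # Check if next character is a symbol letter (start of new statement)
--             # or a number (continuation of current statement's range)
--             if i + 1 < len(clause):
--                 next_char = clause[i + 1]
--                 if next_char.isalpha() or next_char == "!":
--                     # New statement starts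
--                     if current_stmt:
--                         statements.append(current_stmt.strip())
--                     current_stmt = ""
--                     i += 1
--                     continue
--                 else:
--                     # Continuation of current statement's range
--                     current_stmt += char
--             else:
--                 # End of clause
--                 if current_stmt:
--                     statements.append(current_stmt.strip())
--                 current_stmt = ""
--         else:
--             current_stmt += char
--
--         i += 1
--
--     # Add last statement
--     if current_stmt:
--         statements.append(current_stmt.strip())
--
--     return statements
-- ===== SOURCE B (Python) =====
-- def _extract_statements(clause: str) -> list[str]:
--     """Boundaries-first rewrite: one pass finds separator commas, then the
--     clause is cut into raw segments; non-empty raw segments are stripped."""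
--     n = len(clause)
--     segments = []
--     start = 0
--     for i, ch in enumerate(clause):
--         if ch == "," and (i == n - 1 or clause[i + 1].isalpha() or clause[i + 1] == "!"):
--             segments.append(clause[start:i])
--             start = i + 1
--     segments.append(clause[start:])
--     return [s.strip() for s in segments if s]
-- ===== Notes on version B (the rewrite author's own statement) =====
-- stated objective: alternative
-- what changed: A's incremental state machine (current_stmt accumulator with inline append/strip/reset at each comma) is replaced by a boundaries-first decomposition: one enumerate pass marks separator commas and cuts the clause into raw slices, then a second pass strips non-empty raw segments.
import Mathlib
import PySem

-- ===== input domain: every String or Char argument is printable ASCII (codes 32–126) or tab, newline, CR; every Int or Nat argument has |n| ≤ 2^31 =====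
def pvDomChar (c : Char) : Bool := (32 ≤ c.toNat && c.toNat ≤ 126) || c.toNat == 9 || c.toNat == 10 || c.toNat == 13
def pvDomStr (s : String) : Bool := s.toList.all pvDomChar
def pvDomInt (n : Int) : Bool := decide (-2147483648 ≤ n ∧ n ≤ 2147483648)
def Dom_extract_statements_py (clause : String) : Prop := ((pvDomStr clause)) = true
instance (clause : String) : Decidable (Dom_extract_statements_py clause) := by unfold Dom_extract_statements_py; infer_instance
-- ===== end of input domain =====

-- B replaces A's interleaved state machine by a boundaries-first decomposition (find separator
-- commas, cut the clause into raw slices, then strip/filter in a second pass); objective: alternative.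

-- ===== PORT A =====
-- A's while-loop: state = (remaining chars, current_stmt, statements); branches in A's order.
def pvALoop : List Char → List Char → List (List Char) → List (List Char)
  | [], cur, stmts => if cur.isEmpty then stmts else stmts ++ [PySem.Chars.strip cur]
  | c :: rest, cur, stmts =>
    if c = ',' then
      match rest with
      | next :: _ =>
        if PySem.Chars.isalpha next || next == '!' then
          pvALoop rest [] (if cur.isEmpty then stmts else stmts ++ [PySem.Chars.strip cur])
        else
          pvALoop rest (cur ++ [c]) stmts
      | [] =>
        pvALoop rest [] (if cur.isEmpty then stmts else stmts ++ [PySem.Chars.strip cur])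
    else
      pvALoop rest (cur ++ [c]) stmts

def extract_statements_py (clause : String) : List String :=
  (pvALoop clause.toList [] []).map (fun cs => String.ofList cs)

-- ===== PORT B =====
-- Source B's separator test: ch == "," and (i == n-1 or clause[i+1].isalpha() or clause[i+1] == "!")
def pvIsSep (full : List Char) (n : Int) (i : Int) (ch : Char) : Bool :=
  ch == ',' && (i == n - 1 ||
    (PySem.List.pyGet? full (i + 1)).any (fun nc => PySem.Chars.isalpha nc || nc == '!'))

-- Source B's loop body: on a separator, cut off clause[start:i] and restart after the comma.
def pvF (full : List Char) (st : List (List Char) × Int) (p : Int × Char) : List (List Char) × Int :=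
  if pvIsSep full (full.length : Int) p.1 p.2 then
    (st.1 ++ [PySem.List.slice full (some st.2) (some p.1)], p.1 + 1)
  else st

def extract_statements_py_alt (clause : String) : List String :=
  let full := clause.toList
  let st := (PySem.List.enumerate full 0).foldl (pvF full) ([], 0)
  let segments := st.1 ++ [PySem.List.slice full (some st.2) none]
  (segments.filter (fun s => !s.isEmpty)).map (fun s => String.ofList (PySem.Chars.strip s))

-- ===== PRECONDITION & SPEC =====
def Spec_extract_statements_py (clause : String) (out : List String) : Prop := out = extract_statements_py_alt clause
instance (clause : String) (out : List String) : Decidable (Spec_extract_statements_py clause out) := by unfold Spec_extract_statements_py; infer_instance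

-- ===== CLAIM (what is proved, stated in full; the proofs are below) =====
def Claim_equal_extract_statements_py : Prop := ∀ (clause : String), Dom_extract_statements_py clause → Spec_extract_statements_py clause (extract_statements_py clause)

-- ===== LEMMAS AND PROOFS =====
-- B's second pass ([s.strip() for s in segments if s]) on the char-list level.
def pvProc (ss : List (List Char)) : List (List Char) :=
  (ss.filter (fun s => !s.isEmpty)).map PySem.Chars.strip

theorem pvProc_append (a b : List (List Char)) : pvProc (a ++ b) = pvProc a ++ pvProc b := by
  simp [pvProc]

theorem pvProc_single (s : List Char) :
    pvProc [s] = if s.isEmpty then [] else [PySem.Chars.strip s] := by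
  cases s <;> simp [pvProc]

-- Unfolding equations for A's loop, one per shape of its branch structure.
theorem pvALoop_nil (cur : List Char) (stmts : List (List Char)) :
    pvALoop [] cur stmts = if cur.isEmpty then stmts else stmts ++ [PySem.Chars.strip cur] := by
  rw [pvALoop.eq_def]

theorem pvALoop_cons_ne (c : Char) (rest cur : List Char) (stmts : List (List Char))
    (hc : c ≠ ',') : pvALoop (c :: rest) cur stmts = pvALoop rest (cur ++ [c]) stmts := by
  rw [pvALoop.eq_def]; simp [hc]

theorem pvALoop_comma_last (cur : List Char) (stmts : List (List Char)) :
    pvALoop [','] cur stmts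
      = if cur.isEmpty then stmts else stmts ++ [PySem.Chars.strip cur] := by
  rw [pvALoop.eq_def]; simp [pvALoop_nil]

theorem pvALoop_comma_sep (next : Char) (rest' cur : List Char) (stmts : List (List Char))
    (h : (PySem.Chars.isalpha next || next == '!') = true) :
    pvALoop (',' :: next :: rest') cur stmts
      = pvALoop (next :: rest') []
          (if cur.isEmpty then stmts else stmts ++ [PySem.Chars.strip cur]) := by
  rw [pvALoop.eq_def]; simp [h]

theorem pvALoop_comma_cont (next : Char) (rest' cur : List Char) (stmts : List (List Char))
    (h : (PySem.Chars.isalpha next || next == '!') = false) :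
    pvALoop (',' :: next :: rest') cur stmts
      = pvALoop (next :: rest') (cur ++ [',']) stmts := by
  rw [pvALoop.eq_def]; simp [h]

-- Core invariant: B's fold from position k with segment start `start`, post-processed by pvProc,
-- computes exactly what A's state machine computes from the same point, where A's current_stmt
-- is the slice full[start:k].
theorem pvMain (full : List Char) (l : List Char) :
    ∀ (k start : Nat) (segs stmts : List (List Char)),
    full.drop k = l → start ≤ k →
    stmts ++ pvProc (((PySem.List.enumerate l (k : Int)).foldl (pvF full) (segs, (start : Int))).1
        ++ [PySem.List.slice full (some ((PySem.List.enumerate l (k : Int)).foldl (pvF full) (segs, (start : Int))).2) none])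
    = pvALoop l ((full.drop start).take (k - start)) (stmts ++ pvProc segs) := by
  induction l with
  | nil =>
    intro k start segs stmts hdrop hsk
    have hlen : full.length ≤ k := List.drop_eq_nil_iff.mp hdrop
    have hcur : (full.drop start).take (k - start) = full.drop start := by
      apply List.take_of_length_le; simp; omega
    simp only [PySem.List.enumerate_nil, List.foldl_nil, PySem.List.slice_from_natCast,
      pvALoop_nil, hcur, pvProc_append, pvProc_single]
    by_cases h : (full.drop start).isEmpty <;> simp [h]
  | cons c rest ih =>
    intro k start segs stmts hdrop hsk
    have hk : k < full.length := by
      by_contra h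
      rw [not_lt] at h
      rw [List.drop_eq_nil_iff.mpr h] at hdrop
      exact (List.cons_ne_nil c rest) hdrop.symm
    have hrest : full.drop (k+1) = rest := by
      rw [← List.drop_drop, hdrop, List.drop_one, List.tail_cons]
    have hgetk : full[k]? = some c := by
      have h := congrArg (fun t => t[0]?) hdrop
      simpa using h
    simp only [PySem.List.enumerate_cons, List.foldl_cons]
    by_cases hc : c = ','
    case neg =>
      have hsep : pvIsSep full (full.length : Int) (k : Int) c = false := by
        simp [pvIsSep, hc]
      rw [show pvF full (segs, (start:Int)) ((k:Int), c) = (segs, (start:Int)) from by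
        simp [pvF, hsep]]
      rw [show ((k:Int) + 1) = ((k+1 : Nat) : Int) from by push_cast; ring]
      rw [ih (k+1) start segs stmts hrest (by omega)]
      have htake : (full.drop start).take (k+1-start) = (full.drop start).take (k-start) ++ [c] := by
        rw [show k+1-start = (k-start)+1 from by omega, List.take_add_one]
        have h1 : (full.drop start)[k-start]? = some c := by
          rw [List.getElem?_drop, show start + (k-start) = k from by omega, hgetk]
        simp [h1]
      rw [htake, pvALoop_cons_ne c rest _ _ hc]
    case pos =>
      subst hc
      cases rest with
      | nil =>
        have hkn : full.length = k + 1 := by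
          have := List.drop_eq_nil_iff.mp hrest; omega
        have hsep : pvIsSep full (full.length : Int) (k : Int) ',' = true := by
          have hki : (k : Int) = (full.length : Int) - 1 := by omega
          simp [pvIsSep, hki]
        simp only [PySem.List.enumerate_nil, List.foldl_nil]
        rw [show pvF full (segs, (start:Int)) ((k:Int), ',')
            = (segs ++ [PySem.List.slice full (some (start:Int)) (some (k:Int))], (k:Int)+1) from by
          simp [pvF, hsep]]
        rw [show ((k:Int) + 1) = ((k+1 : Nat) : Int) from by push_cast; ring]
        rw [PySem.List.slice_from_natCast, hrest, PySem.List.slice_natCast]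
        rw [pvALoop_comma_last]
        rw [pvProc_append, pvProc_append, pvProc_single, pvProc_single]
        by_cases hcur : ((full.drop start).take (k-start)).isEmpty <;> simp [hcur]
      | cons next rest' =>
        have hkn : k + 1 < full.length := by
          by_contra h
          rw [not_lt] at h
          rw [List.drop_eq_nil_iff.mpr h] at hrest
          exact (List.cons_ne_nil next rest') hrest.symm
        have hne : ((k:Int) == (full.length:Int) - 1) = false := by
          simp only [beq_eq_false_iff_ne, ne_eq]
          omega
        have hget1 : full[k+1]? = some next := by
          have h := congrArg (fun t => t[0]?) hrest
          simpa using h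
        have hget : PySem.List.pyGet? full ((k:Int) + 1) = some next := by
          rw [show ((k:Int) + 1) = ((k+1 : Nat) : Int) from by push_cast; ring,
            PySem.List.pyGet?_natCast, hget1]
        have hsepv : pvIsSep full (full.length : Int) (k : Int) ','
            = (PySem.Chars.isalpha next || next == '!') := by
          simp [pvIsSep, hne, hget]
        by_cases halpha : (PySem.Chars.isalpha next || next == '!') = true
        · rw [show pvF full (segs, (start:Int)) ((k:Int), ',')
              = (segs ++ [PySem.List.slice full (some (start:Int)) (some (k:Int))], (k:Int)+1) from by
            simp [pvF, hsepv, halpha]]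
          rw [show ((k:Int) + 1) = ((k+1 : Nat) : Int) from by push_cast; ring]
          rw [PySem.List.slice_natCast]
          rw [ih (k+1) (k+1) (segs ++ [(full.drop start).take (k-start)]) stmts hrest (le_refl _)]
          simp only [Nat.sub_self, List.take_zero, pvProc_append, pvProc_single]
          rw [pvALoop_comma_sep next rest' _ _ halpha]
          by_cases hcur : ((full.drop start).take (k-start)).isEmpty <;> simp [hcur]
        · have halpha' : (PySem.Chars.isalpha next || next == '!') = false :=
            Bool.eq_false_iff.mpr halpha
          rw [show pvF full (segs, (start:Int)) ((k:Int), ',') = (segs, (start:Int)) from by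
            simp [pvF, hsepv, halpha']]
          rw [show ((k:Int) + 1) = ((k+1 : Nat) : Int) from by push_cast; ring]
          rw [ih (k+1) start segs stmts hrest (by omega)]
          have htake : (full.drop start).take (k+1-start)
              = (full.drop start).take (k-start) ++ [','] := by
            rw [show k+1-start = (k-start)+1 from by omega, List.take_add_one]
            have h1 : (full.drop start)[k-start]? = some ',' := by
              rw [List.getElem?_drop, show start + (k-start) = k from by omega, hgetk]
            simp [h1]
          rw [htake, pvALoop_comma_cont next rest' _ _ halpha']

-- ===== VERDICT (by name: the statement is the Claim_ definition above) =====
theorem extract_statements_py_spec : Claim_equal_extract_statements_py := by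
  intro clause _
  show extract_statements_py clause = extract_statements_py_alt clause
  have h := pvMain clause.toList clause.toList 0 0 [] [] (by simp) (le_refl 0)
  simp only [Nat.cast_zero, List.drop_zero, List.take_zero, Nat.sub_zero] at h
  simp only [pvProc, List.filter_nil, List.map_nil, List.append_nil, List.nil_append] at h
  simp only [extract_statements_py, extract_statements_py_alt]
  rw [← h]
  simp only [List.map_map]
  rfl
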